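-- pv_equiv track=rewrite | github.com/HabibEbrahimi2025/LeetCodePractice | DayStrik/MaxScoreFromRemoving.py | maxScoreFromRemoving
-- ===== SOURCE A (Python) =====
-- def maxScoreFromRemoving(s, x, y):
--
--     def remover(s, first, second, value):
--         stack=[]
--         res=0
--
--         for ch in s:
--             if stack and stack[-1]==first and ch==second:
--                 stack.pop()
--                 res+=value
--             else:
--                 stack.append(ch)
--         return ''.join(stack), res
--
--
--     res1=0
--     res2=0
--     if x>y:
--         s, res1=remover(s, 'a', 'b', x)
--         s , res2 = remover(s, 'b', 'a', y)
--     else: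
--         s, res1=remover(s, 'b', 'a', y)
--         s , res2 = remover(s, 'a', 'b', x)
--     return res1+res2
-- ===== SOURCE B (Python) =====
-- def maxScoreFromRemoving(s, x, y):
--     # Single pass with two counters per segment; no intermediate string/stack.
--     if x > y:
--         first, second, hi, lo = 'a', 'b', x, y
--     else:
--         first, second, hi, lo = 'b', 'a', y, x
--     a = b = score = 0
--     for ch in s:
--         if ch == first:
--             a += 1
--         elif ch == second:
--             if a > 0:
--                 a -= 1
--                 score += hi
--             else:
--                 b += 1
--         else:
--             score += lo * min(a, b)
--             a = b = 0
--     return score + lo * min(a, b)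
-- ===== Notes on version B (the rewrite author's own statement) =====
-- stated objective: simpler
-- what changed: Replaces the two stack-building passes (remove 'ab' then 'ba' on the rebuilt string) with one left-to-right pass keeping two integer counters per separator-delimited segment and flushing low-value pairs at segment ends, never building any intermediate string.
import Mathlib
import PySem

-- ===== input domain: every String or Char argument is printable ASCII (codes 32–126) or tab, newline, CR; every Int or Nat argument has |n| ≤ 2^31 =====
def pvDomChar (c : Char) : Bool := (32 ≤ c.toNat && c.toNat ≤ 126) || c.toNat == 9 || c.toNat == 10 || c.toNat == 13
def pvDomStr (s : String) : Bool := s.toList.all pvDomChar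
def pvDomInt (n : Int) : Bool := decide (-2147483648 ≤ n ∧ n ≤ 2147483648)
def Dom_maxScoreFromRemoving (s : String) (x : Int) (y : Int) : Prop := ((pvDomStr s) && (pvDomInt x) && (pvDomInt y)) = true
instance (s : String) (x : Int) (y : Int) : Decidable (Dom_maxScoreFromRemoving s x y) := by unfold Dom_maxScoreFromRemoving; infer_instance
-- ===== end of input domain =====

-- B replaces A's two stack passes (+ intermediate string) by one counter pass; objective: simpler.

-- ===== PORT A =====
-- one step of A's inner `remover` loop: pop-and-score on a (first,second) match, else push
def pvStep1 (first second : Char) (value : Int) (acc : List Char × Int) (ch : Char) : List Char × Int :=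
  if acc.1 ≠ [] ∧ acc.1.getLast? = some first ∧ ch = second then
    (acc.1.dropLast, acc.2 + value)
  else
    (acc.1 ++ [ch], acc.2)

def remover (s : String) (first second : Char) (value : Int) : String × Int :=
  let r := s.toList.foldl (pvStep1 first second value) ([], 0)
  (String.ofList r.1, r.2)

def maxScoreFromRemoving (s : String) (x : Int) (y : Int) : Int :=
  if x > y then
    let p1 := remover s 'a' 'b' x
    let p2 := remover p1.1 'b' 'a' y
    p1.2 + p2.2
  else
    let p1 := remover s 'b' 'a' y
    let p2 := remover p1.1 'a' 'b' x
    p1.2 + p2.2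

-- ===== PORT B =====
-- one step of B's single pass: state = (aCount, bCount, score)
def altStep (first second : Char) (hi lo : Int) (st : Int × Int × Int) (ch : Char) : Int × Int × Int :=
  if ch = first then (st.1 + 1, st.2.1, st.2.2)
  else if ch = second then
    (if st.1 > 0 then (st.1 - 1, st.2.1, st.2.2 + hi) else (st.1, st.2.1 + 1, st.2.2))
  else (0, 0, st.2.2 + lo * min st.1 st.2.1)

def maxScoreFromRemoving_alt (s : String) (x : Int) (y : Int) : Int :=
  let cfg := if x > y then ('a', 'b', x, y) else ('b', 'a', y, x)
  let st := s.toList.foldl (altStep cfg.1 cfg.2.1 cfg.2.2.1 cfg.2.2.2) (0, 0, 0)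
  st.2.2 + cfg.2.2.2 * min st.1 st.2.1

-- ===== PRECONDITION & SPEC =====
def Spec_maxScoreFromRemoving (s : String) (x : Int) (y : Int) (out : Int) : Prop := out = maxScoreFromRemoving_alt s x y
instance (s : String) (x : Int) (y : Int) (out : Int) : Decidable (Spec_maxScoreFromRemoving s x y out) := by unfold Spec_maxScoreFromRemoving; infer_instance

-- ===== CLAIM (what is proved, stated in full; the proofs are below) =====
def Claim_equal_maxScoreFromRemoving : Prop := ∀ (s : String) (x : Int) (y : Int), Dom_maxScoreFromRemoving s x y → Spec_maxScoreFromRemoving s x y (maxScoreFromRemoving s x y)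

-- ===== LEMMAS AND PROOFS =====

-- separator structure of a frozen prefix: empty, or ends with a char that is neither pattern char
def PvSep (fc scc : Char) (P : List Char) : Prop :=
  P = [] ∨ ∃ P₀ c, P = P₀ ++ [c] ∧ c ≠ fc ∧ c ≠ scc

-- the two outcomes of one step of A's loop
lemma step1_push (f s : Char) (v : Int) (st : List Char) (r : Int) (ch : Char)
    (h : ¬(st ≠ [] ∧ st.getLast? = some f ∧ ch = s)) :
    pvStep1 f s v (st, r) ch = (st ++ [ch], r) := by
  unfold pvStep1; rw [if_neg h]

lemma step1_pop (f s : Char) (v : Int) (st : List Char) (r : Int) (ch : Char)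
    (h : st ≠ [] ∧ st.getLast? = some f ∧ ch = s) :
    pvStep1 f s v (st, r) ch = (st.dropLast, r + v) := by
  unfold pvStep1; rw [if_pos h]

-- score threads additively through A's fold; the stack part is score-independent
lemma foldl_step1_offset (f s : Char) (v : Int) :
    ∀ (l : List Char) (st : List Char) (r : Int),
      List.foldl (pvStep1 f s v) (st, r) l
        = ((List.foldl (pvStep1 f s v) (st, 0) l).1,
           r + (List.foldl (pvStep1 f s v) (st, 0) l).2) := by
  intro l
  induction l with
  | nil => intro st r; simp
  | cons ch t ih =>
      intro st r
      rcases hsd : pvStep1 f s v (st, 0) ch with ⟨sig, del⟩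
      have hstep : pvStep1 f s v (st, r) ch = (sig, r + del) := by
        unfold pvStep1 at hsd ⊢
        split_ifs at hsd ⊢ <;> cases hsd <;> simp
      simp only [List.foldl_cons]
      rw [hstep, hsd, ih sig (r + del), ih sig del]
      simp [add_assoc]

-- score threads additively through B's fold; the counters are score-independent
lemma foldl_alt_offset (f s : Char) (hi lo : Int) :
    ∀ (l : List Char) (a b : Int) (r : Int),
      List.foldl (altStep f s hi lo) (a, b, r) l
        = ((List.foldl (altStep f s hi lo) (a, b, 0) l).1,
           (List.foldl (altStep f s hi lo) (a, b, 0) l).2.1,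
           r + (List.foldl (altStep f s hi lo) (a, b, 0) l).2.2) := by
  intro l
  induction l with
  | nil => intro a b r; simp
  | cons ch t ih =>
      intro a b r
      rcases hsd : altStep f s hi lo (a, b, 0) ch with ⟨a2, b2, del⟩
      have hstep : altStep f s hi lo (a, b, r) ch = (a2, b2, r + del) := by
        unfold altStep at hsd ⊢
        split_ifs at hsd ⊢ <;> cases hsd <;> simp
      simp only [List.foldl_cons]
      rw [hstep, hsd, ih a2 b2 (r + del), ih a2 b2 del]
      simp [add_assoc]

-- a run of characters ≠ `s` is pushed wholesale (no pop can fire)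
lemma foldl_push_run (f s : Char) (v : Int) (c : Char) (hc : c ≠ s) :
    ∀ (n : Nat) (Q : List Char) (r : Int),
      List.foldl (pvStep1 f s v) (Q, r) (List.replicate n c) = (Q ++ List.replicate n c, r) := by
  intro n
  induction n with
  | zero => intro Q r; simp
  | succ m ih =>
      intro Q r
      rw [List.replicate_succ, List.foldl_cons,
        step1_push f s v Q r c (fun h => hc h.2.2), ih]
      simp

-- general-state version of step1_push (for opaque fold states)
lemma step1_push' (f s : Char) (v : Int) (p : List Char × Int) (ch : Char)
    (h : ¬(p.1 ≠ [] ∧ p.1.getLast? = some f ∧ ch = s)) :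
    pvStep1 f s v p ch = (p.1 ++ [ch], p.2) := by
  unfold pvStep1; rw [if_neg h]

-- a run of `s` characters is pushed wholesale when `f` never reaches the top
lemma foldl_push_run2 (f s : Char) (v : Int) (hfs : f ≠ s) :
    ∀ (n : Nat) (Q : List Char) (r : Int), Q.getLast? ≠ some f →
      List.foldl (pvStep1 f s v) (Q, r) (List.replicate n s) = (Q ++ List.replicate n s, r) := by
  intro n
  induction n with
  | zero => intro Q r _; simp
  | succ m ih =>
      intro Q r hQ
      rw [List.replicate_succ, List.foldl_cons,
        step1_push f s v Q r s (by rintro ⟨-, h2, -⟩; exact hQ h2),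
        ih (Q ++ [s]) r (by rw [List.getLast?_concat]; simpa using Ne.symm hfs)]
      simp

-- consuming `rep k s` against a stack `Q ++ rep j f` (last of Q not f): pops min j k pairs
lemma foldl_pop_run (f s : Char) (v : Int) (hfs : f ≠ s) :
    ∀ (k j : Nat) (Q : List Char) (r : Int), Q.getLast? ≠ some f →
      List.foldl (pvStep1 f s v) (Q ++ List.replicate j f, r) (List.replicate k s)
        = (Q ++ List.replicate (j - k) f ++ List.replicate (k - j) s, r + v * (min j k : Nat)) := by
  intro k
  induction k with
  | zero => intro j Q r _; simp
  | succ m ih =>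
      intro j Q r hQ
      rw [List.replicate_succ, List.foldl_cons]
      cases j with
      | zero =>
          rw [step1_push f s v _ r s (by
            rintro ⟨-, h2, -⟩
            exact hQ (by simpa using h2)),
            foldl_push_run2 f s v hfs m ((Q ++ List.replicate 0 f) ++ [s]) r (by
              rw [List.getLast?_concat]; simpa using Ne.symm hfs)]
          simp [List.replicate_succ]
      | succ j' =>
          have hlast : (Q ++ List.replicate (j' + 1) f).getLast? = some f := by
            rw [List.replicate_succ', ← List.append_assoc]
            exact List.getLast?_concat
          rw [step1_pop f s v _ r s ⟨by simp [List.replicate_succ], hlast, rfl⟩]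
          have hdrop : (Q ++ List.replicate (j' + 1) f).dropLast = Q ++ List.replicate j' f := by
            rw [List.replicate_succ', ← List.append_assoc, List.dropLast_concat]
          rw [hdrop, ih j' Q (r + v) hQ]
          have hmin : (min (j' + 1) (m + 1) : Nat) = min j' m + 1 := by omega
          have hj : j' + 1 - (m + 1) = j' - m := by omega
          have hm : m + 1 - (j' + 1) = m - j' := by omega
          rw [hmin, hj, hm]
          push_cast
          ring_nf

-- a fold over a list ending in a char ≠ s leaves that char on top of the stack
lemma foldl_last (f s : Char) (v : Int) (P : List Char) (c : Char) (hc : c ≠ s) (r : Int) :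
    (List.foldl (pvStep1 f s v) (([] : List Char), r) (P ++ [c])).1.getLast? = some c := by
  rw [List.foldl_append]
  simp only [List.foldl_cons, List.foldl_nil]
  rw [step1_push' f s v _ c (fun h => hc h.2.2)]
  simp

-- the pass-2 stack of a frozen prefix never has `scc` on top
lemma pass2_top (fc scc : Char) (lo : Int) (P : List Char) (hP : PvSep fc scc P) :
    (List.foldl (pvStep1 scc fc lo) (([] : List Char), 0) P).1.getLast? ≠ some scc := by
  rcases hP with rfl | ⟨P₀, c, rfl, hcf, hcs⟩
  · simp
  · rw [foldl_last scc fc lo P₀ c hcf 0]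
    simp [hcs]

-- pass 2 over `P ++ sc^j ++ fc^k`: the segment contributes lo * min j k
lemma pass2_seg (fc scc : Char) (hfs : fc ≠ scc) (lo : Int) (P : List Char) (hP : PvSep fc scc P)
    (j k : Nat) :
    List.foldl (pvStep1 scc fc lo) (([] : List Char), 0)
        (P ++ List.replicate j scc ++ List.replicate k fc)
      = ((List.foldl (pvStep1 scc fc lo) (([] : List Char), 0) P).1
           ++ List.replicate (j - k) scc ++ List.replicate (k - j) fc,
         (List.foldl (pvStep1 scc fc lo) (([] : List Char), 0) P).2 + lo * (min j k : Nat)) := by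
  rw [List.foldl_append, List.foldl_append]
  have hQ := pass2_top fc scc lo P hP
  set Q := List.foldl (pvStep1 scc fc lo) (([] : List Char), 0) P with hQdef
  have hps : List.foldl (pvStep1 scc fc lo) Q (List.replicate j scc)
      = (Q.1 ++ List.replicate j scc, Q.2) := by
    rw [← foldl_push_run scc fc lo scc (Ne.symm hfs) j Q.1 Q.2]
  rw [hps, foldl_pop_run scc fc lo hfs.symm k j Q.1 Q.2 hQ]

-- MAIN INVARIANT: A's pass-1 stack is P ++ scc^j ++ fc^k with P frozen;
-- A's total (pass-1 score so far + pass-2 score of the final stack) equals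
-- pass-2's score on P plus B's single-pass total started from counters (k, j).
lemma main_lemma (fc scc : Char) (hfs : fc ≠ scc) (hi lo : Int) :
    ∀ (l P : List Char) (j k : Nat), PvSep fc scc P →
      (List.foldl (pvStep1 fc scc hi) (P ++ List.replicate j scc ++ List.replicate k fc, 0) l).2
        + (List.foldl (pvStep1 scc fc lo) (([] : List Char), 0)
            ((List.foldl (pvStep1 fc scc hi) (P ++ List.replicate j scc ++ List.replicate k fc, 0) l).1)).2
      = (List.foldl (pvStep1 scc fc lo) (([] : List Char), 0) P).2
        + ((List.foldl (altStep fc scc hi lo) ((k : Int), (j : Int), 0) l).2.2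
           + lo * min (List.foldl (altStep fc scc hi lo) ((k : Int), (j : Int), 0) l).1
                      (List.foldl (altStep fc scc hi lo) ((k : Int), (j : Int), 0) l).2.1) := by
  intro l
  induction l with
  | nil =>
      intro P j k hP
      simp only [List.foldl_nil]
      rw [pass2_seg fc scc hfs lo P hP j k]
      rw [Nat.cast_min]
      simp [min_comm]
  | cons ch t ih =>
      intro P j k hP
      simp only [List.foldl_cons]
      by_cases hchf : ch = fc
      · -- push fc : k grows
        have h1 : pvStep1 fc scc hi (P ++ List.replicate j scc ++ List.replicate k fc, 0) ch
            = (P ++ List.replicate j scc ++ List.replicate (k + 1) fc, 0) := by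
          rw [step1_push fc scc hi _ _ ch (by
            rintro ⟨-, -, h3⟩
            exact hfs (hchf ▸ h3 ▸ rfl))]
          simp [List.replicate_succ', hchf]
        have h2 : altStep fc scc hi lo ((k : Int), (j : Int), 0) ch
            = (((k + 1 : Nat) : Int), (j : Int), 0) := by
          unfold altStep; rw [if_pos hchf]; push_cast; ring_nf
        rw [h1, h2]
        exact ih P j (k + 1) hP
      · by_cases hchs : ch = scc
        · cases k with
          | zero =>
              -- no fc on top: push scc, j grows
              have hlast : (P ++ List.replicate j scc ++ List.replicate 0 fc).getLast? ≠ some fc := by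
                simp only [List.replicate_zero, List.append_nil]
                cases j with
                | zero =>
                    rcases hP with rfl | ⟨P₀, c, rfl, hcf, hcs⟩
                    · simp
                    · simp [hcf]
                | succ j' =>
                    rw [List.replicate_succ', ← List.append_assoc, List.getLast?_concat]
                    simp [Ne.symm hfs]
              have h1 : pvStep1 fc scc hi (P ++ List.replicate j scc ++ List.replicate 0 fc, 0) ch
                  = (P ++ List.replicate (j + 1) scc ++ List.replicate 0 fc, 0) := by
                rw [step1_push fc scc hi _ _ ch (by
                  rintro ⟨-, h2, -⟩
                  exact hlast h2)]
                simp [List.replicate_succ', hchs]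
              have h2 : altStep fc scc hi lo ((0 : Nat), (j : Int), 0) ch
                  = (((0 : Nat) : Int), ((j + 1 : Nat) : Int), 0) := by
                unfold altStep; rw [if_neg hchf, if_pos hchs, if_neg (by simp)]
                push_cast; ring_nf
              rw [h1]
              push_cast at h2 ⊢
              rw [h2]
              have := ih P (j + 1) 0 hP
              push_cast at this
              exact this
          | succ k' =>
              -- fc on top: pop, score hi
              have hlast : (P ++ List.replicate j scc ++ List.replicate (k' + 1) fc).getLast? = some fc := by
                rw [List.replicate_succ', ← List.append_assoc]
                exact List.getLast?_concat
              have h1 : pvStep1 fc scc hi (P ++ List.replicate j scc ++ List.replicate (k' + 1) fc, 0) ch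
                  = (P ++ List.replicate j scc ++ List.replicate k' fc, 0 + hi) := by
                rw [step1_pop fc scc hi _ _ ch ⟨by simp [List.replicate_succ], hlast, hchs⟩]
                rw [List.replicate_succ', ← List.append_assoc, List.dropLast_concat, List.append_assoc]
              have h2 : altStep fc scc hi lo (((k' + 1 : Nat) : Int), (j : Int), 0) ch
                  = (((k' : Nat) : Int), (j : Int), 0 + hi) := by
                unfold altStep; rw [if_neg hchf, if_pos hchs, if_pos (by push_cast; positivity)]
                push_cast; ring_nf
              push_cast at h1 h2 ⊢
              rw [h1, h2, foldl_step1_offset, foldl_alt_offset]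
              have hih := ih P j k' hP
              push_cast at hih
              simp only []
              linarith [hih]
        · -- separator: freeze segment, flush min, reset counters
          have h1 : pvStep1 fc scc hi (P ++ List.replicate j scc ++ List.replicate k fc, 0) ch
              = ((P ++ List.replicate j scc ++ List.replicate k fc) ++ [ch], 0) := by
            rw [step1_push fc scc hi _ _ ch (by
              rintro ⟨-, -, h3⟩
              exact hchs h3)]
          have h2 : altStep fc scc hi lo ((k : Int), (j : Int), 0) ch
              = (0, 0, 0 + lo * min (k : Int) (j : Int)) := by
            unfold altStep; rw [if_neg hchf, if_neg hchs]
          rw [h1, h2]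
          have hP' : PvSep fc scc ((P ++ List.replicate j scc ++ List.replicate k fc) ++ [ch]) :=
            Or.inr ⟨_, ch, rfl, hchf, hchs⟩
          have hIH := ih ((P ++ List.replicate j scc ++ List.replicate k fc) ++ [ch]) 0 0 hP'
          have hseg : (List.foldl (pvStep1 scc fc lo) (([] : List Char), 0)
                ((P ++ List.replicate j scc ++ List.replicate k fc) ++ [ch])).2
              = (List.foldl (pvStep1 scc fc lo) (([] : List Char), 0) P).2 + lo * (min j k : Nat) := by
            rw [List.foldl_append, pass2_seg fc scc hfs lo P hP j k,
              List.foldl_cons, List.foldl_nil,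
              step1_push scc fc lo _ _ ch (by
                rintro ⟨-, -, h3⟩
                exact hchf h3)]
          have hmin : lo * min ((k : Int)) ((j : Int)) = lo * ((min j k : Nat) : Int) := by
            rw [Nat.cast_min, min_comm]
          rw [foldl_alt_offset]
          push_cast at hIH
          simp only [List.append_nil, List.append_assoc] at hIH hseg ⊢
          rw [hIH, hseg, hmin]
          ring

-- helper to run main_lemma at the top level for one configuration
lemma pipeline_eq (fc scc : Char) (hfs : fc ≠ scc) (hi lo : Int) (l : List Char) :
    (List.foldl (pvStep1 fc scc hi) (([] : List Char), 0) l).2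
      + (List.foldl (pvStep1 scc fc lo) (([] : List Char), 0)
          ((List.foldl (pvStep1 fc scc hi) (([] : List Char), 0) l).1)).2
    = (List.foldl (altStep fc scc hi lo) (0, 0, 0) l).2.2
      + lo * min (List.foldl (altStep fc scc hi lo) (0, 0, 0) l).1
                 (List.foldl (altStep fc scc hi lo) (0, 0, 0) l).2.1 := by
  have := main_lemma fc scc hfs hi lo l [] 0 0 (Or.inl rfl)
  simpa using this

-- ===== VERDICT (by name: the statement is the Claim_ definition above) =====
theorem maxScoreFromRemoving_spec : Claim_equal_maxScoreFromRemoving := by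
  intro s x y _
  unfold Spec_maxScoreFromRemoving maxScoreFromRemoving maxScoreFromRemoving_alt remover
  by_cases hxy : x > y
  · simp only [if_pos hxy]
    have := pipeline_eq 'a' 'b' (by decide) x y s.toList
    simpa [String.toList_ofList] using this
  · simp only [if_neg hxy]
    have := pipeline_eq 'b' 'a' (by decide) y x s.toList
    simpa [String.toList_ofList] using this
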